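-- pv_equiv track=rewrite | github.com/manwar/perlweeklychallenge-club | challenge-132/roger-bell-west/python/ch-2.py | hj
-- ===== SOURCE A (Python) =====
-- def hj(a,b,c,d):
--   h=[a,c]
--   i=[b,d]
--   m=dict()
--   for x in range(2):
--     j=1-i[x]
--     for y in range(len(h[x])):
--       if not h[x][y][i[x]] in m:
--         m[h[x][y][i[x]]]=[[],[]]
--       m[h[x][y][i[x]]][x].append(h[x][y][j])
--   o=[]
--   for k in sorted(m.keys()):
--     for a in m[k][0]:
--       for b in m[k][1]:
--         o.append([a,k,b])
--   return o
-- ===== SOURCE B (Python) =====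
-- def hj(a, b, c, d):
--     keys = sorted({r[b] for r in a} & {r[d] for r in c})
--     return [[x[1 - b], k, y[1 - d]]
--             for k in keys
--             for x in a if x[b] == k
--             for y in c if y[d] == k]
-- ===== Notes on version B (the rewrite author's own statement) =====
-- stated objective: simpler
-- what changed: Replaces the two-pass dict grouping plus triple nested append loop by a single comprehension over the sorted intersection of the two key sets, rescanning each table with a filter per common key.
import Mathlib
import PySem

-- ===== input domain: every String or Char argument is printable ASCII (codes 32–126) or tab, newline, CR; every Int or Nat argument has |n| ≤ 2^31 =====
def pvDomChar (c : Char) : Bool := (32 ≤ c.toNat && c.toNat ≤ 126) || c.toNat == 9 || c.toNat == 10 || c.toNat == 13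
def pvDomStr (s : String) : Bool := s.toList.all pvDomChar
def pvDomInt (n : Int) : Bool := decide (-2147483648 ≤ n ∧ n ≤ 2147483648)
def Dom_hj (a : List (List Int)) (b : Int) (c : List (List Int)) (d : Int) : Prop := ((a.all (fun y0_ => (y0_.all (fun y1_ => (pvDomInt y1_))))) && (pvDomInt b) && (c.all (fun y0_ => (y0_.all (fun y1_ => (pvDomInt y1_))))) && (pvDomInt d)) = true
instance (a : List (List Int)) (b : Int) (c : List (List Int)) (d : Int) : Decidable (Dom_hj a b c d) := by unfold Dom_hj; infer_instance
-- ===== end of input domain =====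

-- B replaces A's two-pass dict grouping plus triple nested append loop by one comprehension
-- over the sorted intersection of the two key sets (objective: simpler; no speed claim).

-- ===== PORT A =====
-- m[k] is the Python two-slot list [[],[]], modelled as a pair; m[k][x].append(w) is pvAppendAt
def pvAppendAt (v : List Int × List Int) (x : Int) (w : Int) : List Int × List Int :=
  if x = 0 then (v.1 ++ [w], v.2) else (v.1, v.2 ++ [w])

def hj (a : List (List Int)) (b : Int) (c : List (List Int)) (d : Int) : List (List Int) :=
  let h := [a, c]
  let i := [b, d]
  let m := (PySem.List.pyRange 0 2 1).foldl (fun m x =>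
    let j := 1 - PySem.List.pyGetD i x 0
    (PySem.List.pyRange 0 (PySem.List.len (PySem.List.pyGetD h x [])) 1).foldl (fun m y =>
      let row := PySem.List.pyGetD (PySem.List.pyGetD h x []) y []
      let key := PySem.List.pyGetD row (PySem.List.pyGetD i x 0) 0
      let m := if m.contains key then m else m.insert key ([], [])
      m.modify key ([], []) (fun v => pvAppendAt v x (PySem.List.pyGetD row j 0))) m)
    (PySem.Dict.empty : PySem.Dict Int (List Int × List Int))
  (PySem.List.sorted m.keys (fun k => k) false).foldl (fun o k =>
    (m.getD k ([], [])).1.foldl (fun o av =>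
      (m.getD k ([], [])).2.foldl (fun o bv => o ++ [[av, k, bv]]) o) o) []

-- ===== PORT B =====
def hj_alt (a : List (List Int)) (b : Int) (c : List (List Int)) (d : Int) : List (List Int) :=
  let keys := PySem.List.sorted
      (PySem.Set.inter (PySem.Set.ofList (a.map (fun r => PySem.List.pyGetD r b 0)))
                       (PySem.Set.ofList (c.map (fun r => PySem.List.pyGetD r d 0))))
      (fun k => k) false
  keys.flatMap (fun k =>
    (a.filter (fun x => PySem.List.pyGetD x b 0 == k)).flatMap (fun x =>
      (c.filter (fun y => PySem.List.pyGetD y d 0 == k)).map (fun y =>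
        [PySem.List.pyGetD x (1 - b) 0, k, PySem.List.pyGetD y (1 - d) 0])))

-- ===== PRECONDITION & SPEC =====
-- exactly the inputs where every row indexing r[b], r[1-b] (rows of a) and r[d], r[1-d]
-- (rows of c) the Python performs is in range; elsewhere A raises IndexError
def Pre_hj (a : List (List Int)) (b : Int) (c : List (List Int)) (d : Int) : Prop :=
  (∀ r ∈ a, PySem.Raise.InRange r.length b ∧ PySem.Raise.InRange r.length (1 - b)) ∧
  (∀ r ∈ c, PySem.Raise.InRange r.length d ∧ PySem.Raise.InRange r.length (1 - d))
instance (a : List (List Int)) (b : Int) (c : List (List Int)) (d : Int) : Decidable (Pre_hj a b c d) := by unfold Pre_hj; infer_instance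

def pvWitness_hj : List (List Int) × Int × List (List Int) × Int :=
  ([[1, 10], [2, 20]], 0, [[1, 30], [3, 40]], 0)

def Spec_hj (a : List (List Int)) (b : Int) (c : List (List Int)) (d : Int) (out : List (List Int)) : Prop := out = hj_alt a b c d
instance (a : List (List Int)) (b : Int) (c : List (List Int)) (d : Int) (out : List (List Int)) : Decidable (Spec_hj a b c d out) := by unfold Spec_hj; infer_instance

-- ===== CLAIM (what is proved, stated in full; the proofs are below) =====
def Claim_equal_hj : Prop := ∀ (a : List (List Int)) (b : Int) (c : List (List Int)) (d : Int), Dom_hj a b c d → Pre_hj a b c d → Spec_hj a b c d (hj a b c d)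

-- ===== LEMMAS AND PROOFS =====

-- proof-side names for A's two grouping passes and its output stage
def pvStepL (b : Int) (m : PySem.Dict Int (List Int × List Int)) (r : List Int) : PySem.Dict Int (List Int × List Int) :=
  let key := PySem.List.pyGetD r b 0
  (if m.contains key then m else m.insert key ([], [])).modify key ([], [])
    (fun v => pvAppendAt v 0 (PySem.List.pyGetD r (1 - b) 0))

def pvStepR (d : Int) (m : PySem.Dict Int (List Int × List Int)) (r : List Int) : PySem.Dict Int (List Int × List Int) :=
  let key := PySem.List.pyGetD r d 0
  (if m.contains key then m else m.insert key ([], [])).modify key ([], [])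
    (fun v => pvAppendAt v 1 (PySem.List.pyGetD r (1 - d) 0))

def pvM (a : List (List Int)) (b : Int) (c : List (List Int)) (d : Int) : PySem.Dict Int (List Int × List Int) :=
  c.foldl (pvStepR d) (a.foldl (pvStepL b) PySem.Dict.empty)

def pvMraw (a : List (List Int)) (b : Int) (c : List (List Int)) (d : Int) : PySem.Dict Int (List Int × List Int) :=
  List.foldl (fun m j => pvStepR d m (PySem.List.pyGetD c j []))
    (List.foldl (fun m j => pvStepL b m (PySem.List.pyGetD a j [])) PySem.Dict.empty
      (PySem.List.pyRange 0 (PySem.List.len a) 1))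
    (PySem.List.pyRange 0 (PySem.List.len c) 1)

def pvOut (m : PySem.Dict Int (List Int × List Int)) : List (List Int) :=
  (PySem.List.sorted m.keys (fun k => k) false).foldl (fun o k =>
    (m.getD k ([], [])).1.foldl (fun o av =>
      (m.getD k ([], [])).2.foldl (fun o bv => o ++ [[av, k, bv]]) o) o) []

-- the per-key block of output (B's shape)
def pvG (a : List (List Int)) (b : Int) (c : List (List Int)) (d : Int) (k : Int) : List (List Int) :=
  (a.filter (fun x => PySem.List.pyGetD x b 0 == k)).flatMap (fun x =>
    (c.filter (fun y => PySem.List.pyGetD y d 0 == k)).map (fun y =>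
      [PySem.List.pyGetD x (1 - b) 0, k, PySem.List.pyGetD y (1 - d) 0]))

def pvInter (a : List (List Int)) (b : Int) (c : List (List Int)) (d : Int) : PySem.Set Int :=
  PySem.Set.inter (PySem.Set.ofList (a.map (fun r => PySem.List.pyGetD r b 0)))
                  (PySem.Set.ofList (c.map (fun r => PySem.List.pyGetD r d 0)))

lemma pyfold_L (a : List (List Int)) (b : Int) (m0 : PySem.Dict Int (List Int × List Int)) :
    List.foldl (fun m j => pvStepL b m (PySem.List.pyGetD a j [])) m0 (PySem.List.pyRange 0 (PySem.List.len a) 1) = a.foldl (pvStepL b) m0 := by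
  rw [PySem.List.len_eq]
  exact PySem.List.foldl_pyRange_zero_pyGetD' a [] (pvStepL b) m0

lemma pyfold_R (c : List (List Int)) (d : Int) (m0 : PySem.Dict Int (List Int × List Int)) :
    List.foldl (fun m j => pvStepR d m (PySem.List.pyGetD c j [])) m0 (PySem.List.pyRange 0 (PySem.List.len c) 1) = c.foldl (pvStepR d) m0 := by
  rw [PySem.List.len_eq]
  exact PySem.List.foldl_pyRange_zero_pyGetD' c [] (pvStepR d) m0

lemma pvMraw_eq (a : List (List Int)) (b : Int) (c : List (List Int)) (d : Int) :
    pvMraw a b c d = pvM a b c d := by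
  unfold pvMraw pvM
  rw [pyfold_L, pyfold_R]

lemma hj_eq_raw (a : List (List Int)) (b : Int) (c : List (List Int)) (d : Int) :
    hj a b c d = pvOut (pvMraw a b c d) := by
  rfl

-- value of one left-pass step at a key
lemma getD_stepL (b : Int) (m : PySem.Dict Int (List Int × List Int)) (r : List Int) (k : Int) :
    (pvStepL b m r).getD k ([], []) =
      if k = PySem.List.pyGetD r b 0
      then ((m.getD k ([], [])).1 ++ [PySem.List.pyGetD r (1 - b) 0], (m.getD k ([], [])).2)
      else m.getD k ([], []) := by
  simp only [pvStepL, pvAppendAt]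
  have hbase : (if m.contains (PySem.List.pyGetD r b 0) then m else m.insert (PySem.List.pyGetD r b 0) ([], [])).getD (PySem.List.pyGetD r b 0) ([], []) = m.getD (PySem.List.pyGetD r b 0) ([], []) := by
    split_ifs with h
    · rfl
    · rw [PySem.Dict.getD_insert, if_pos rfl,
        PySem.Dict.getD_of_not_contains m ([], []) (by simpa using h)]
  have hoth : ∀ _ : ¬ k = PySem.List.pyGetD r b 0, (if m.contains (PySem.List.pyGetD r b 0) then m else m.insert (PySem.List.pyGetD r b 0) ([], [])).getD k ([], []) = m.getD k ([], []) := by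
    intro hk
    split_ifs with h
    · rfl
    · rw [PySem.Dict.getD_insert, if_neg hk]
  rw [PySem.Dict.getD_modify]
  by_cases hk : k = PySem.List.pyGetD r b 0
  · rw [if_pos hk, if_pos hk, hbase, hk]
    simp
  · rw [if_neg hk, if_neg hk, hoth hk]

lemma getD_stepR (d : Int) (m : PySem.Dict Int (List Int × List Int)) (r : List Int) (k : Int) :
    (pvStepR d m r).getD k ([], []) =
      if k = PySem.List.pyGetD r d 0
      then ((m.getD k ([], [])).1, (m.getD k ([], [])).2 ++ [PySem.List.pyGetD r (1 - d) 0])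
      else m.getD k ([], []) := by
  simp only [pvStepR, pvAppendAt, if_neg (by norm_num : ¬ (1 : Int) = 0)]
  have hbase : (if m.contains (PySem.List.pyGetD r d 0) then m else m.insert (PySem.List.pyGetD r d 0) ([], [])).getD (PySem.List.pyGetD r d 0) ([], []) = m.getD (PySem.List.pyGetD r d 0) ([], []) := by
    split_ifs with h
    · rfl
    · rw [PySem.Dict.getD_insert, if_pos rfl,
        PySem.Dict.getD_of_not_contains m ([], []) (by simpa using h)]
  have hoth : ∀ _ : ¬ k = PySem.List.pyGetD r d 0, (if m.contains (PySem.List.pyGetD r d 0) then m else m.insert (PySem.List.pyGetD r d 0) ([], [])).getD k ([], []) = m.getD k ([], []) := by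
    intro hk
    split_ifs with h
    · rfl
    · rw [PySem.Dict.getD_insert, if_neg hk]
  rw [PySem.Dict.getD_modify]
  by_cases hk : k = PySem.List.pyGetD r d 0
  · rw [if_pos hk, if_pos hk, hbase, hk]
  · rw [if_neg hk, if_neg hk, hoth hk]

lemma getD_foldl_L (b : Int) (l : List (List Int)) (m : PySem.Dict Int (List Int × List Int)) (k : Int) :
    (l.foldl (pvStepL b) m).getD k ([], []) =
      ((m.getD k ([], [])).1 ++ (l.filter (fun r => PySem.List.pyGetD r b 0 == k)).map (fun r => PySem.List.pyGetD r (1 - b) 0),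
       (m.getD k ([], [])).2) := by
  induction l generalizing m with
  | nil => simp
  | cons r l ih =>
    rw [List.foldl_cons, ih, getD_stepL]
    by_cases hk : k = PySem.List.pyGetD r b 0
    · rw [if_pos hk, List.filter_cons_of_pos (by simp [hk])]
      simp
    · rw [if_neg hk, List.filter_cons_of_neg (by simp; exact fun h => hk h.symm)]

lemma getD_foldl_R (d : Int) (l : List (List Int)) (m : PySem.Dict Int (List Int × List Int)) (k : Int) :
    (l.foldl (pvStepR d) m).getD k ([], []) =
      ((m.getD k ([], [])).1,
       (m.getD k ([], [])).2 ++ (l.filter (fun r => PySem.List.pyGetD r d 0 == k)).map (fun r => PySem.List.pyGetD r (1 - d) 0)) := by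
  induction l generalizing m with
  | nil => simp
  | cons r l ih =>
    rw [List.foldl_cons, ih, getD_stepR]
    by_cases hk : k = PySem.List.pyGetD r d 0
    · rw [if_pos hk, List.filter_cons_of_pos (by simp [hk])]
      simp
    · rw [if_neg hk, List.filter_cons_of_neg (by simp; exact fun h => hk h.symm)]

lemma getD_pvM (a : List (List Int)) (b : Int) (c : List (List Int)) (d : Int) (k : Int) :
    (pvM a b c d).getD k ([], []) =
      ((a.filter (fun r => PySem.List.pyGetD r b 0 == k)).map (fun r => PySem.List.pyGetD r (1 - b) 0),
       (c.filter (fun r => PySem.List.pyGetD r d 0 == k)).map (fun r => PySem.List.pyGetD r (1 - d) 0)) := by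
  unfold pvM
  rw [getD_foldl_R, getD_foldl_L]
  simp [PySem.Dict.getD_empty]

lemma mem_keys_stepL (b : Int) (m : PySem.Dict Int (List Int × List Int)) (r : List Int) (k : Int) :
    k ∈ (pvStepL b m r).keys ↔ k = PySem.List.pyGetD r b 0 ∨ k ∈ m.keys := by
  simp only [pvStepL]
  rw [PySem.Dict.keys_modify, PySem.Dict.mem_keys_insert]
  split_ifs with h
  · tauto
  · rw [PySem.Dict.mem_keys_insert]; tauto

lemma mem_keys_stepR (d : Int) (m : PySem.Dict Int (List Int × List Int)) (r : List Int) (k : Int) :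
    k ∈ (pvStepR d m r).keys ↔ k = PySem.List.pyGetD r d 0 ∨ k ∈ m.keys := by
  simp only [pvStepR]
  rw [PySem.Dict.keys_modify, PySem.Dict.mem_keys_insert]
  split_ifs with h
  · tauto
  · rw [PySem.Dict.mem_keys_insert]; tauto

lemma mem_keys_foldl_L (b : Int) (l : List (List Int)) (m : PySem.Dict Int (List Int × List Int)) (k : Int) :
    k ∈ (l.foldl (pvStepL b) m).keys ↔ (∃ r ∈ l, k = PySem.List.pyGetD r b 0) ∨ k ∈ m.keys := by
  induction l generalizing m with
  | nil => simp
  | cons r l ih =>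
    rw [List.foldl_cons, ih, mem_keys_stepL]
    simp only [List.mem_cons]
    constructor
    · rintro (⟨s, hs, hk⟩ | (hk | hm))
      · exact Or.inl ⟨s, Or.inr hs, hk⟩
      · exact Or.inl ⟨r, Or.inl rfl, hk⟩
      · exact Or.inr hm
    · rintro (⟨s, (rfl | hs), hk⟩ | hm)
      · exact Or.inr (Or.inl hk)
      · exact Or.inl ⟨s, hs, hk⟩
      · exact Or.inr (Or.inr hm)

lemma mem_keys_foldl_R (d : Int) (l : List (List Int)) (m : PySem.Dict Int (List Int × List Int)) (k : Int) :
    k ∈ (l.foldl (pvStepR d) m).keys ↔ (∃ r ∈ l, k = PySem.List.pyGetD r d 0) ∨ k ∈ m.keys := by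
  induction l generalizing m with
  | nil => simp
  | cons r l ih =>
    rw [List.foldl_cons, ih, mem_keys_stepR]
    simp only [List.mem_cons]
    constructor
    · rintro (⟨s, hs, hk⟩ | (hk | hm))
      · exact Or.inl ⟨s, Or.inr hs, hk⟩
      · exact Or.inl ⟨r, Or.inl rfl, hk⟩
      · exact Or.inr hm
    · rintro (⟨s, (rfl | hs), hk⟩ | hm)
      · exact Or.inr (Or.inl hk)
      · exact Or.inl ⟨s, hs, hk⟩
      · exact Or.inr (Or.inr hm)

lemma mem_keys_pvM (a : List (List Int)) (b : Int) (c : List (List Int)) (d : Int) (k : Int) :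
    k ∈ (pvM a b c d).keys ↔
      k ∈ a.map (fun r => PySem.List.pyGetD r b 0) ∨ k ∈ c.map (fun r => PySem.List.pyGetD r d 0) := by
  unfold pvM
  rw [mem_keys_foldl_R, mem_keys_foldl_L]
  simp only [PySem.Dict.keys_empty, List.not_mem_nil, or_false, List.mem_map]
  constructor
  · rintro (⟨r, hr, rfl⟩ | ⟨r, hr, rfl⟩)
    · exact Or.inr ⟨r, hr, rfl⟩
    · exact Or.inl ⟨r, hr, rfl⟩
  · rintro (⟨r, hr, rfl⟩ | ⟨r, hr, rfl⟩)
    · exact Or.inr ⟨r, hr, rfl⟩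
    · exact Or.inl ⟨r, hr, rfl⟩

lemma nodup_keys_stepL (b : Int) (m : PySem.Dict Int (List Int × List Int)) (r : List Int)
    (h : m.keys.Nodup) : (pvStepL b m r).keys.Nodup := by
  simp only [pvStepL]
  rw [PySem.Dict.keys_modify]
  apply PySem.Dict.nodup_keys_insert
  split_ifs with hc
  · exact h
  · exact PySem.Dict.nodup_keys_insert _ _ _ h

lemma nodup_keys_stepR (d : Int) (m : PySem.Dict Int (List Int × List Int)) (r : List Int)
    (h : m.keys.Nodup) : (pvStepR d m r).keys.Nodup := by
  simp only [pvStepR]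
  rw [PySem.Dict.keys_modify]
  apply PySem.Dict.nodup_keys_insert
  split_ifs with hc
  · exact h
  · exact PySem.Dict.nodup_keys_insert _ _ _ h

lemma nodup_keys_foldl_L (b : Int) (l : List (List Int)) (m : PySem.Dict Int (List Int × List Int))
    (h : m.keys.Nodup) : (l.foldl (pvStepL b) m).keys.Nodup := by
  induction l generalizing m with
  | nil => exact h
  | cons r l ih => exact ih _ (nodup_keys_stepL b m r h)

lemma nodup_keys_foldl_R (d : Int) (l : List (List Int)) (m : PySem.Dict Int (List Int × List Int))
    (h : m.keys.Nodup) : (l.foldl (pvStepR d) m).keys.Nodup := by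
  induction l generalizing m with
  | nil => exact h
  | cons r l ih => exact ih _ (nodup_keys_stepR d m r h)

lemma nodup_keys_pvM (a : List (List Int)) (b : Int) (c : List (List Int)) (d : Int) :
    (pvM a b c d).keys.Nodup := by
  unfold pvM
  exact nodup_keys_foldl_R d c _ (nodup_keys_foldl_L b a _ PySem.Dict.nodup_keys_empty)

lemma hj_eq_G (a : List (List Int)) (b : Int) (c : List (List Int)) (d : Int) :
    hj a b c d = (PySem.List.sorted (pvM a b c d).keys (fun k => k) false).flatMap (pvG a b c d) := by
  rw [hj_eq_raw, pvMraw_eq]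
  simp only [pvOut, PySem.List.foldl_append_singleton_eq_map, PySem.List.foldl_append_eq_flatMap,
    List.nil_append]
  congr 1
  funext k
  rw [getD_pvM]
  simp [pvG, List.flatMap_map, List.map_map, Function.comp_def]

lemma hj_alt_eq (a : List (List Int)) (b : Int) (c : List (List Int)) (d : Int) :
    hj_alt a b c d = (PySem.List.sorted (pvInter a b c d) (fun k => k) false).flatMap (pvG a b c d) := by
  rfl

lemma flatMap_eq_flatMap_filter {α β : Type} (l : List α) (p : α → Bool) (g : α → List β)
    (h : ∀ x ∈ l, p x = false → g x = []) : l.flatMap g = (l.filter p).flatMap g := by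
  induction l with
  | nil => rfl
  | cons x l ih =>
    have ih' := ih (fun y hy => h y (List.mem_cons_of_mem _ hy))
    rcases hx : p x with _ | _
    · rw [List.flatMap_cons, h x (by simp) hx, List.filter_cons_of_neg (by simp [hx]), ih']
      rfl
    · rw [List.flatMap_cons, List.filter_cons_of_pos hx, List.flatMap_cons, ih']

lemma pvG_eq_nil (a : List (List Int)) (b : Int) (c : List (List Int)) (d : Int) (k : Int)
    (hk : k ∉ pvInter a b c d) : pvG a b c d k = [] := by
  simp only [pvInter, PySem.Set.mem_inter, PySem.Set.mem_ofList, List.mem_map, not_and_or] at hk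
  rcases hk with h1 | h2
  · have ha : a.filter (fun x => PySem.List.pyGetD x b 0 == k) = [] :=
      List.filter_eq_nil_iff.mpr (fun r hr => by
        simp only [beq_iff_eq]
        exact fun he => h1 ⟨r, hr, he⟩)
    simp [pvG, ha]
  · have hc : c.filter (fun y => PySem.List.pyGetD y d 0 == k) = [] :=
      List.filter_eq_nil_iff.mpr (fun r hr => by
        simp only [beq_iff_eq]
        exact fun he => h2 ⟨r, hr, he⟩)
    simp [pvG, hc]

lemma sorted_keys_filter (a : List (List Int)) (b : Int) (c : List (List Int)) (d : Int) :
    PySem.List.sorted (pvInter a b c d) (fun k => k) false =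
      (PySem.List.sorted (pvM a b c d).keys (fun k => k) false).filter
        (fun k => decide (k ∈ pvInter a b c d)) := by
  have hndS : (PySem.List.sorted (pvM a b c d).keys (fun k => k) false).Nodup :=
    (PySem.List.sorted_perm (pvM a b c d).keys (fun k => k) false).symm.nodup (nodup_keys_pvM a b c d)
  apply PySem.List.sorted_eq_of_perm_of_pairwise_lt
  · have hnd2 : (pvInter a b c d).Nodup := by
      unfold pvInter
      exact PySem.Set.nodup_inter _ _ (PySem.Set.nodup_ofList _)
    rw [List.perm_ext_iff_of_nodup (hndS.filter _) hnd2]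
    intro y
    simp only [List.mem_filter, PySem.List.mem_sorted, decide_eq_true_eq]
    constructor
    · rintro ⟨-, hy⟩
      exact hy
    · intro hy
      refine ⟨?_, hy⟩
      have h2 := (PySem.Set.mem_inter _ _ y).mp hy
      rw [mem_keys_pvM]
      exact Or.inl ((PySem.Set.mem_ofList _ _).mp h2.1)
  · have hpw : List.Pairwise (fun x y : Int => x ≤ y)
        (PySem.List.sorted (pvM a b c d).keys (fun k => k) false) :=
      PySem.List.sorted_pairwise (pvM a b c d).keys (fun k => k)
    have hne : List.Pairwise (fun x y : Int => x ≠ y)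
        (PySem.List.sorted (pvM a b c d).keys (fun k => k) false) := hndS
    exact ((hpw.and hne).imp (fun h => lt_of_le_of_ne h.1 h.2)).filter _

-- ===== VERDICT (by name: the statement is the Claim_ definition above) =====
theorem hj_spec : Claim_equal_hj := by
  intro a b c d _ _
  unfold Spec_hj
  rw [hj_eq_G, hj_alt_eq, sorted_keys_filter]
  exact flatMap_eq_flatMap_filter _ _ _ (fun k _ hk =>
    pvG_eq_nil a b c d k (fun hmem => by simp [hmem] at hk))
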